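-- pv_equiv track=rewrite | github.com/danielMC11/PYTHON-30-DAYS | MY_PACKAGE/extract_words.py | clean_words
-- ===== SOURCE A (Python) =====
-- from string import ascii_lowercase as low, ascii_uppercase as up
--
-- def clean_words(lst_words):
--     new_words = list()
--     all_letters = low + up
--     for word in lst_words:
--         if word[0] not in all_letters and word[len(word)-1] not in all_letters:
--             new_words.append(word[1:len(word)-1])
--         elif word[0] not in all_letters:
--             new_words.append((word[1:]))
--         elif word[len(word)-1] not in all_letters:
--             new_words.append(word[:len(word)-1])
--         else:
--             new_words.append(word)
--     return new_words
-- ===== SOURCE B (Python) =====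
-- from string import ascii_lowercase as low, ascii_uppercase as up
--
-- def clean_words(lst_words):
--     letters = set(low + up)
--     cleaned = []
--     for word in lst_words:
--         n = len(word)
--         kept = [c for i, c in enumerate(word)
--                 if (0 < i or c in letters) and (i < n - 1 or c in letters)]
--         cleaned.append(''.join(kept))
--     return cleaned
-- ===== Notes on version B (the rewrite author's own statement) =====
-- stated objective: alternative
-- what changed: Instead of A's four-way if/elif chain that inspects the two end characters and takes one of four slices, B scans each word character by character with enumerate and keeps a character unless it is a non-letter at index 0 or index len-1, joining the survivors; no slicing at all.
import Mathlib
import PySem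

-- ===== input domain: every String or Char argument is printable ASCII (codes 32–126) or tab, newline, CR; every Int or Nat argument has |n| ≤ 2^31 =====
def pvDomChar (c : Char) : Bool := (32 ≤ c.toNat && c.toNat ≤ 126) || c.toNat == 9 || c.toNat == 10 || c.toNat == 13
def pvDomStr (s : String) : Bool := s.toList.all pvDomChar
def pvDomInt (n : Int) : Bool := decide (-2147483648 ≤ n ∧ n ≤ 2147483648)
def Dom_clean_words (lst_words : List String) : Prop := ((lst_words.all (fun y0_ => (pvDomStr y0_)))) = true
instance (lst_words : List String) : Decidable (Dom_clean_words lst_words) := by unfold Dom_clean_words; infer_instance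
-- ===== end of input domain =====

-- B drops A's four-way if/elif chain of end slices entirely: it scans each word character by
-- character and keeps a character unless it is a non-letter sitting at index 0 or index n-1 (simpler, one uniform pass).

-- ===== PORT A =====

-- ascii_lowercase + ascii_uppercase, as a list of characters
def pvLetters : List Char := "abcdefghijklmnopqrstuvwxyzABCDEFGHIJKLMNOPQRSTUVWXYZ".toList

-- body of A's loop for one word (on List Char; 'c in all_letters' for the 1-char string c is char membership)
def pvCleanA (cs : List Char) : List Char :=
  let c0 := PySem.List.pyGetD cs 0 ' '
  let cn := PySem.List.pyGetD cs ((cs.length : Int) - 1) ' '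
  if ¬ c0 ∈ pvLetters ∧ ¬ cn ∈ pvLetters then
    PySem.List.slice cs (some 1) (some ((cs.length : Int) - 1))
  else if ¬ c0 ∈ pvLetters then
    PySem.List.slice cs (some 1) none
  else if ¬ cn ∈ pvLetters then
    PySem.List.slice cs none (some ((cs.length : Int) - 1))
  else cs

def clean_words (lst_words : List String) : List String :=
  lst_words.foldl (fun new_words word => new_words ++ [String.ofList (pvCleanA word.toList)]) []

-- ===== PORT B =====

-- B's per-word pass: the comprehension over enumerate(word) with the keep predicate
-- (membership in set(low+up) is the same char-membership as in the list pvLetters)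
def pvKeptB (cs : List Char) : List Char :=
  let n : Int := cs.length
  ((PySem.List.enumerate cs 0).filter (fun ic =>
    (decide (0 < ic.1) || decide (ic.2 ∈ pvLetters)) &&
    (decide (ic.1 < n - 1) || decide (ic.2 ∈ pvLetters)))).map (·.2)

def clean_words_alt (lst_words : List String) : List String :=
  lst_words.foldl (fun cleaned word => cleaned ++ [String.ofList (pvKeptB word.toList)]) []

-- ===== PRECONDITION & SPEC =====
-- Pre_ excludes lists containing the empty string, on which A raises IndexError (word[0]).
def Pre_clean_words (lst_words : List String) : Prop := ∀ w ∈ lst_words, w.toList ≠ []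
instance (lst_words : List String) : Decidable (Pre_clean_words lst_words) := by unfold Pre_clean_words; infer_instance
def pvWitness_clean_words : List String := [".hello!", "world", "!", "a"]
def Spec_clean_words (lst_words : List String) (out : List String) : Prop := out = clean_words_alt lst_words
instance (lst_words : List String) (out : List String) : Decidable (Spec_clean_words lst_words out) := by unfold Spec_clean_words; infer_instance

-- ===== CLAIM (what is proved, stated in full; the proofs are below) =====
def Claim_equal_clean_words : Prop := ∀ (lst_words : List String), Dom_clean_words lst_words → Pre_clean_words lst_words → Spec_clean_words lst_words (clean_words lst_words)

-- ===== LEMMAS AND PROOFS =====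

-- B on a one-character word
theorem pvKeptB_single (a : Char) : pvKeptB [a] = if a ∈ pvLetters then [a] else [] := by
  by_cases h : a ∈ pvLetters <;>
    simp [pvKeptB, PySem.List.enumerate_cons, PySem.List.enumerate_nil, h]

-- B on a word of length ≥ 2: first and last kept iff letters, middle kept unconditionally
theorem pvKeptB_concat (a b : Char) (ms : List Char) :
    pvKeptB (a :: (ms ++ [b])) =
      (if a ∈ pvLetters then [a] else []) ++ ms ++ (if b ∈ pvLetters then [b] else []) := by
  unfold pvKeptB
  rw [show (a :: (ms ++ [b])) = (a :: ms) ++ [b] from rfl,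
      PySem.List.enumerate_append, PySem.List.enumerate_cons,
      PySem.List.enumerate_cons, PySem.List.enumerate_nil]
  simp only [zero_add, List.filter_append, List.filter_cons, List.filter_nil, List.map_append]
  have hmid : ∀ p ∈ PySem.List.enumerate ms 1,
      ((decide (0 < p.1) || decide (p.2 ∈ pvLetters)) &&
       (decide (p.1 < ((((a :: ms) ++ [b]).length : Nat) : Int) - 1) || decide (p.2 ∈ pvLetters))) = true := by
    intro p hp
    obtain ⟨k, hk, rfl⟩ := (PySem.List.mem_enumerate_iff ms 1 p).mp hp
    have h1 : (0:Int) < 1 + k := by omega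
    simp [h1]
    left
    omega
  rw [List.filter_eq_self.mpr hmid]
  by_cases ha : a ∈ pvLetters <;> by_cases hb : b ∈ pvLetters <;>
    simp [ha, hb, PySem.List.map_snd_enumerate]

-- the per-word bodies agree on a nonempty word
theorem pvClean_eq (cs : List Char) (h : cs ≠ []) : pvCleanA cs = pvKeptB cs := by
  obtain ⟨a, t, rfl⟩ := List.exists_cons_of_ne_nil h
  rcases List.eq_nil_or_concat t with rfl | ⟨ms, b, rfl⟩
  · -- one-character word
    rw [pvKeptB_single]
    unfold pvCleanA
    by_cases hA : a ∈ pvLetters <;>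
      simp [hA, PySem.List.pyGetD, PySem.List.pyGet?, PySem.List.pyIdx?,
            PySem.List.slice_toNat ([a]) (a := 1) (b := 0) (by omega) (by omega)]
  · -- length ≥ 2: cs = a :: ms ++ [b]
    simp only [List.concat_eq_append]
    rw [pvKeptB_concat]
    have hlen : ((a :: (ms ++ [b])).length : Int) - 1 = ((ms.length + 1 : Nat) : Int) := by
      simp only [List.length_cons, List.length_append, List.length_nil]
      push_cast
      omega
    have hc0 : PySem.List.pyGetD (a :: (ms ++ [b])) 0 ' ' = a := by
      rw [show (0:Int) = ((0:Nat):Int) from rfl, PySem.List.pyGetD_natCast]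
      simp [List.getD]
    have hcn : PySem.List.pyGetD (a :: (ms ++ [b])) (((a :: (ms ++ [b])).length : Int) - 1) ' ' = b := by
      rw [hlen, PySem.List.pyGetD_natCast]
      simp [List.getD]
    unfold pvCleanA
    rw [hc0, hcn, hlen]
    by_cases ha : a ∈ pvLetters <;> by_cases hb : b ∈ pvLetters
    · simp [ha, hb]
    · -- last non-letter only: cs[:n-1]
      rw [if_neg (by simp [ha, hb]), if_neg (by simp [ha]), if_pos (by simp [hb])]
      rw [PySem.List.slice_to_natCast]
      simp [ha, hb, List.take_succ_cons, List.take_left']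
    · -- first non-letter only: cs[1:]
      rw [if_neg (by simp [ha, hb]), if_pos (by simp [ha])]
      rw [PySem.List.slice_from (a := 1) _ (by omega)]
      simp [ha, hb]
    · -- both non-letters: cs[1:n-1]
      rw [if_pos (by simp [ha, hb])]
      rw [PySem.List.slice_toNat _ (by omega) (by omega)]
      simp [ha, hb, List.take_left']

-- ===== VERDICT (by name: the statements are the Claim_ definitions above) =====
theorem clean_words_spec : Claim_equal_clean_words := by
  intro lst _ hpre
  unfold Spec_clean_words clean_words clean_words_alt
  rw [PySem.List.foldl_append_singleton_eq_map, PySem.List.foldl_append_singleton_eq_map]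
  apply List.map_congr_left
  intro w hw
  rw [pvClean_eq w.toList (hpre w hw)]
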